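-- pv_equiv track=rewrite | github.com/NatashaKSS/simple-perceptron-text-classification | DataPrepper(OLD).py | setup_doc_freq
-- ===== SOURCE A (Python) =====
-- def setup_doc_freq(dataset):
--   df = {}
--
--   for doc_name in dataset.keys():
--     for word in dataset[doc_name]:
--       if word not in df.keys():
--         df[word] = [doc_name]
--       else:
--         if doc_name not in df[word]:
--           df[word].append(doc_name)
--
--   return df
-- ===== SOURCE B (Python) =====
-- def setup_doc_freq(dataset):
--   doc_words = {doc: dict.fromkeys(words) for doc, words in dataset.items()}
--   order = dict.fromkeys(w for ws in doc_words.values() for w in ws)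
--   return {w: [doc for doc, ws in doc_words.items() if w in ws]
--           for w in order}
-- ===== Notes on version B (the rewrite author's own statement) =====
-- stated objective: simpler
-- what changed: B is a staged, declarative recomputation: it precomputes each document's distinct-word set (dict.fromkeys), takes the key order as the ordered dedup of all words, and builds each word's value independently as the filter of document names whose word set contains it, replacing A's incremental dict construction with membership tests and conditional appends inside nested loops.
import Mathlib
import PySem

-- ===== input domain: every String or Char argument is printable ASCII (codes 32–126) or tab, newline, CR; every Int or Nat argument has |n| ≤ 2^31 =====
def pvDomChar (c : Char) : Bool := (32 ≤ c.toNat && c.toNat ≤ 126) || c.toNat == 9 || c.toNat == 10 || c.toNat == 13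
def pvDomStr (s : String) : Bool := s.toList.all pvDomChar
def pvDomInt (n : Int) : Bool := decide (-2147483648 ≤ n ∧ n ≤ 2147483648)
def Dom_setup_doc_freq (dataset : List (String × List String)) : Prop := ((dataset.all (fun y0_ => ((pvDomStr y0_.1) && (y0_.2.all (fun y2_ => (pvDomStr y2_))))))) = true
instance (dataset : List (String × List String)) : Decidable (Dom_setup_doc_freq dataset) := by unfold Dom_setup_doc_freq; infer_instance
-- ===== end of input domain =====

-- B recomputes the same document-frequency map in two declarative stages — first the ordered
-- list of distinct words (dict.fromkeys), then one per-word filter over the documents — instead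
-- of A's incremental dict building with membership checks (objective: simpler, not faster).


-- ===== PORT A =====
-- for doc_name in dataset.keys(): for word in dataset[doc_name]: …
-- (dataset[doc_name] cannot raise — doc_name comes from dataset.keys(); getD [] is exact there.
--  df[word] in the else-branch cannot raise — word is then in df's keys; getD [] is exact there.)
def setup_doc_freq (dataset : List (String × List String)) : List (String × List String) :=
  let data := PySem.Dict.ofList dataset
  (data.keys.foldl (fun df doc_name =>
    (data.getD doc_name []).foldl (fun df word =>
      if df.contains word = false then df.insert word [doc_name]
      else if doc_name ∉ df.getD word [] then df.modify word [] (· ++ [doc_name])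
      else df) df)
    (PySem.Dict.empty : PySem.Dict String (List String))).items

-- ===== PORT B =====
-- doc_words = {doc: dict.fromkeys(words) for doc, words in dataset.items()}  (dict.fromkeys = PySem.List.dedup);
-- order = dict.fromkeys(w for ws in doc_words.values() for w in ws);
-- {w: [doc for doc, ws in doc_words.items() if w in ws] for w in order}.
def setup_doc_freq_alt (dataset : List (String × List String)) : List (String × List String) :=
  let data := PySem.Dict.ofList dataset
  let doc_words := PySem.Dict.ofList (data.items.map (fun p => (p.1, PySem.List.dedup p.2)))
  let all_words := doc_words.values.flatMap (fun ws => ws)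
  let order := PySem.List.dedup all_words
  (PySem.Dict.ofList (order.map (fun w =>
    (w, (doc_words.items.filter (fun p => decide (w ∈ p.2))).map Prod.fst)))).items

-- ===== PRECONDITION & SPEC =====
def Spec_setup_doc_freq (dataset : List (String × List String)) (out : List (String × List String)) : Prop := out = setup_doc_freq_alt dataset
instance (dataset : List (String × List String)) (out : List (String × List String)) : Decidable (Spec_setup_doc_freq dataset out) := by unfold Spec_setup_doc_freq; infer_instance

-- ===== CLAIM (what is proved, stated in full; the proofs are below) =====
def Claim_equal_setup_doc_freq : Prop := ∀ (dataset : List (String × List String)), Dom_setup_doc_freq dataset → Spec_setup_doc_freq dataset (setup_doc_freq dataset)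

-- ===== LEMMAS AND PROOFS =====

-- A's inner-loop step on df, for one document doc and one word.
def aStep (doc : String) (df : PySem.Dict String (List String)) (word : String) :
    PySem.Dict String (List String) :=
  if df.contains word = false then df.insert word [doc]
  else if doc ∉ df.getD word [] then df.modify word [] (· ++ [doc])
  else df

lemma getD_aStep (doc : String) (df : PySem.Dict String (List String)) (w u : String) :
    (aStep doc df w).getD u [] =
      df.getD u [] ++ (if u = w ∧ doc ∉ df.getD u [] then [doc] else []) := by
  unfold aStep
  by_cases hc : df.contains w = false
  · rw [if_pos hc, PySem.Dict.getD_insert]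
    by_cases hu : u = w
    · subst hu
      rw [PySem.Dict.getD_of_not_contains df ([] : List String) hc]
      simp
    · simp [hu]
  · rw [if_neg hc]
    by_cases hd : doc ∈ df.getD w []
    · simp only [hd, not_true_eq_false, if_false]
      by_cases hu : u = w
      · subst hu; simp [hd]
      · simp [hu]
    · simp only [hd, not_false_eq_true, if_true]
      rw [PySem.Dict.getD_modify]
      by_cases hu : u = w
      · subst hu; simp [hd]
      · simp [hu]

lemma keys_aStep (doc : String) (df : PySem.Dict String (List String)) (w : String) :
    (aStep doc df w).keys = PySem.Set.add df.keys w := by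
  unfold aStep
  by_cases hc : df.contains w = false
  · rw [if_pos hc, PySem.Dict.keys_insert_of_not_contains df [doc] hc,
      PySem.Set.add_of_not_mem]
    intro hmem
    rw [← PySem.Dict.contains_iff_mem_keys df w] at hmem
    rw [hmem] at hc
    exact Bool.noConfusion hc
  · have hc' : df.contains w = true := by
      cases h : df.contains w
      · exact absurd h hc
      · rfl
    have hkeys : w ∈ df.keys := (PySem.Dict.contains_iff_mem_keys df w).mp hc'
    rw [if_neg hc, PySem.Set.add_of_mem hkeys]
    by_cases hd : doc ∈ df.getD w []
    · simp [hd]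
    · simp only [hd, not_false_eq_true, if_true]
      exact PySem.Dict.keys_insert_of_contains df _ hc'

lemma inner_getD (doc : String) : ∀ (ws : List String) (df : PySem.Dict String (List String))
    (u : String),
    (ws.foldl (aStep doc) df).getD u [] =
      df.getD u [] ++ (if u ∈ ws ∧ doc ∉ df.getD u [] then [doc] else []) := by
  intro ws
  induction ws with
  | nil => intro df u; simp
  | cons w rest ih =>
    intro df u
    rw [List.foldl_cons, ih, getD_aStep]
    by_cases h1 : doc ∈ df.getD u []
    · by_cases h2 : u = w <;> by_cases h3 : u ∈ rest <;>
        simp [h1, h2, h3]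
    · by_cases h2 : u = w
      · subst h2
        simp [h1]
      · by_cases h3 : u ∈ rest <;> simp [h1, h2, h3]

lemma inner_keys (doc : String) : ∀ (ws : List String) (df : PySem.Dict String (List String)),
    (ws.foldl (aStep doc) df).keys = PySem.Set.update df.keys ws := by
  intro ws
  induction ws with
  | nil => intro df; rfl
  | cons w rest ih =>
    intro df
    rw [List.foldl_cons, ih, keys_aStep, PySem.Set.update_cons]

lemma outer_keys : ∀ (l : List (String × List String)) (df : PySem.Dict String (List String)),
    (l.foldl (fun df p => p.2.foldl (aStep p.1) df) df).keys =
      PySem.Set.update df.keys (l.flatMap (fun p => p.2)) := by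
  intro l
  induction l with
  | nil => intro df; simp [PySem.Set.update_nil]
  | cons p rest ih =>
    intro df
    rw [List.foldl_cons, ih, inner_keys, List.flatMap_cons, PySem.Set.update_append]

lemma outer_getD : ∀ (l : List (String × List String)) (df : PySem.Dict String (List String))
    (w : String),
    (∀ p ∈ l, ∀ u, p.1 ∉ df.getD u []) → (l.map Prod.fst).Nodup →
    (l.foldl (fun df p => p.2.foldl (aStep p.1) df) df).getD w [] =
      df.getD w [] ++ (l.filter (fun p => decide (w ∈ p.2))).map Prod.fst := by
  intro l
  induction l with
  | nil => intro df w _ _; simp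
  | cons p rest ih =>
    intro df w hfresh hnd
    have hfresh_p : ∀ u, p.1 ∉ df.getD u [] := hfresh p (List.mem_cons_self)
    have hstep : ∀ u, (p.2.foldl (aStep p.1) df).getD u [] =
        df.getD u [] ++ (if u ∈ p.2 then [p.1] else []) := by
      intro u
      rw [inner_getD]
      simp [hfresh_p u]
    have hfresh' : ∀ q ∈ rest, ∀ u, q.1 ∉ (p.2.foldl (aStep p.1) df).getD u [] := by
      intro q hq u hmem
      rw [hstep u] at hmem
      rcases List.mem_append.mp hmem with h | h
      · exact hfresh q (List.mem_cons_of_mem _ hq) u h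
      · have hqp : q.1 = p.1 := by
          by_cases hcase : u ∈ p.2
          · rw [if_pos hcase] at h; exact List.mem_singleton.mp h
          · rw [if_neg hcase] at h; exact absurd h (List.not_mem_nil)
        exact (List.nodup_cons.mp hnd).1 (hqp ▸ List.mem_map_of_mem (f := Prod.fst) hq)
    rw [List.foldl_cons, ih _ w hfresh' (List.nodup_cons.mp hnd).2, hstep w,
      List.filter_cons]
    by_cases hw : w ∈ p.2
    · simp [hw]
    · simp [hw]

-- ===== VERDICT (by name: the statement is the Claim_ definition above) =====
theorem setup_doc_freq_spec : Claim_equal_setup_doc_freq := by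
  intro dataset _
  unfold Spec_setup_doc_freq setup_doc_freq setup_doc_freq_alt
  show ((PySem.Dict.ofList dataset).keys.foldl
      (fun df doc_name =>
        ((PySem.Dict.ofList dataset).getD doc_name []).foldl (aStep doc_name) df)
      PySem.Dict.empty).items = _
  set data := PySem.Dict.ofList dataset with hdata
  have hnd : data.keys.Nodup := PySem.Dict.nodup_keys_ofList dataset
  have hitems : data.items = data.keys.map (fun k => (k, data.getD k [])) :=
    PySem.Dict.items_eq_map_keys data hnd []
  -- turn A's fold over keys into the fold over items
  have e1 : data.keys.foldl
        (fun df k => (data.getD k []).foldl (aStep k) df) PySem.Dict.empty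
      = data.items.foldl (fun df p => p.2.foldl (aStep p.1) df)
        (PySem.Dict.empty : PySem.Dict String (List String)) := by
    rw [hitems, List.foldl_map]
  rw [e1]
  set dA := data.items.foldl (fun df p => p.2.foldl (aStep p.1) df)
    (PySem.Dict.empty : PySem.Dict String (List String)) with hdA
  have hndi : (data.items.map Prod.fst).Nodup := hnd
  -- A's result: keys and values
  have hAkeys : dA.keys = PySem.Set.ofList (data.items.flatMap (fun p => p.2)) := by
    rw [hdA, outer_keys, PySem.Dict.keys_empty, PySem.Set.update_nil_left]
  have hAgetD : ∀ w, dA.getD w [] =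
      (data.items.filter (fun p => decide (w ∈ p.2))).map Prod.fst := by
    intro w
    rw [hdA, outer_getD data.items PySem.Dict.empty w
      (by intro p _ u h; rw [PySem.Dict.getD_empty] at h; exact absurd h (List.not_mem_nil))
      hndi, PySem.Dict.getD_empty]
    rfl
  have hAnd : dA.keys.Nodup := by rw [hAkeys]; exact PySem.Set.nodup_ofList _
  have hAitems : dA.items =
      (PySem.Set.ofList (data.items.flatMap (fun p => p.2))).map
        (fun w => (w, (data.items.filter (fun p => decide (w ∈ p.2))).map Prod.fst)) := by
    rw [PySem.Dict.items_eq_map_keys dA hAnd [], hAkeys]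
    refine List.map_congr_left (fun w _ => ?_)
    rw [hAgetD w]
  -- B's side
  -- a Dict.ofList over distinct fresh keys keeps its pairs list as items
  have hofList : ∀ (l : List (String × List String)), (l.map Prod.fst).Nodup →
      (PySem.Dict.ofList l).items = l := by
    intro l hl
    have hof : PySem.Dict.ofList l
        = l.foldl (fun d p => d.insert p.1 p.2)
          (PySem.Dict.empty : PySem.Dict String (List String)) := rfl
    rw [hof, PySem.Dict.items_foldl_insert_fresh l Prod.fst Prod.snd PySem.Dict.empty
      (fun a _ => PySem.Dict.contains_empty a.1) hl]
    rw [show (PySem.Dict.empty : PySem.Dict String (List String)).items = [] from rfl]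
    simp
  set dw := data.items.map (fun p => (p.1, PySem.List.dedup p.2)) with hdw
  have hdwnd : (dw.map Prod.fst).Nodup := by
    rw [hdw, List.map_map]
    exact hndi
  have hDW : (PySem.Dict.ofList dw).items = dw := hofList dw hdwnd
  -- the ordered dedup of the dedup-ed word lists is the dedup of the raw word lists
  have hupdOfList : ∀ (xs : List String) (s : PySem.Set String),
      PySem.Set.update s (PySem.Set.ofList xs) = PySem.Set.update s xs := by
    intro xs s
    rw [PySem.Set.update_eq_append_filter, PySem.Set.update_eq_append_filter,
      PySem.Set.ofList_ofList]
  have hflat : ∀ (l : List (String × List String)) (s : PySem.Set String),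
      PySem.Set.update s (l.flatMap (fun p => PySem.List.dedup p.2))
        = PySem.Set.update s (l.flatMap (fun p => p.2)) := by
    intro l
    induction l with
    | nil => intro s; rfl
    | cons p rest ih =>
      intro s
      rw [List.flatMap_cons, List.flatMap_cons, PySem.Set.update_append,
        PySem.Set.update_append,
        show PySem.List.dedup p.2 = PySem.Set.ofList p.2 from rfl, hupdOfList, ih]
  have horder : PySem.List.dedup ((PySem.Dict.ofList dw).values.flatMap (fun ws => ws))
      = PySem.Set.ofList (data.items.flatMap (fun p => p.2)) := by
    show PySem.Set.ofList ((PySem.Dict.ofList dw).values.flatMap (fun ws => ws)) = _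
    have hv : (PySem.Dict.ofList dw).values = data.items.map (fun p => PySem.List.dedup p.2) := by
      show (PySem.Dict.ofList dw).items.map Prod.snd = _
      rw [hDW, hdw, List.map_map]
      rfl
    rw [hv, List.flatMap_map]
    rw [← PySem.Set.update_nil_left, ← PySem.Set.update_nil_left
      (data.items.flatMap fun p => p.2)]
    exact hflat data.items []
  -- each word's document list is unchanged by the per-document dedup
  have hfilter : ∀ w, ((PySem.Dict.ofList dw).items.filter
        (fun p => decide (w ∈ p.2))).map Prod.fst
      = (data.items.filter (fun p => decide (w ∈ p.2))).map Prod.fst := by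
    intro w
    rw [hDW, hdw, List.filter_map, List.map_map]
    congr 1
    · exact List.filter_congr (fun p _ => by
        simp only [Function.comp_apply, decide_eq_decide]
        exact PySem.Set.mem_ofList p.2 w)
  set order := PySem.Set.ofList (data.items.flatMap (fun p => p.2)) with horder'
  set pairs := order.map
    (fun w => (w, (data.items.filter (fun p => decide (w ∈ p.2))).map Prod.fst)) with hpairs
  have hpairsnd : (pairs.map Prod.fst).Nodup := by
    have : pairs.map Prod.fst = order := by
      rw [hpairs, List.map_map]
      simp [Function.comp_def]
    rw [this]
    exact PySem.Set.nodup_ofList _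
  rw [hAitems]
  show pairs = (PySem.Dict.ofList
    ((PySem.List.dedup ((PySem.Dict.ofList dw).values.flatMap (fun ws => ws))).map (fun w =>
      (w, ((PySem.Dict.ofList dw).items.filter (fun p => decide (w ∈ p.2))).map Prod.fst)))).items
  rw [horder]
  have hmapeq : (PySem.Set.ofList (data.items.flatMap (fun p => p.2))).map (fun w =>
      (w, ((PySem.Dict.ofList dw).items.filter (fun p => decide (w ∈ p.2))).map Prod.fst))
      = pairs := by
    rw [hpairs, horder']
    exact List.map_congr_left (fun w _ => by rw [hfilter w])
  rw [hmapeq, hofList pairs hpairsnd]
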